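-- pv_equiv track=rewrite | github.com/SamClercky/Project-EIT | gamelogic/setscore.py | demoscale
-- ===== SOURCE A (Python) =====
-- def demoscale(array: list):
--     newscore=[]
--     for x in array:
--         newscore.append([0,x])
--     array=set(array)
--     array=list(array)
--     array.sort()
--     arrayscale=[]
--     for x in newscore:
--         i=0
--         for y in array:
--             if x[1]==y:
--                 x[0]=i+1
--             i+=1
--     for x in newscore:
--         if 55-x[0]*5>= 0:
--             arrayscale.append(55-x[0]*5)
--         else:
--             arrayscale.append(0)
--     return arrayscale
-- ===== SOURCE B (Python) =====
-- def demoscale(array: list):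
--     uniq = set(array)
--     return [max(0, 50 - 5 * sum(1 for y in uniq if y < x)) for x in array]
-- ===== Notes on version B (the rewrite author's own statement) =====
-- stated objective: simpler
-- what changed: B replaces A's mutable rank table and nested scan over the sorted unique list by a direct per-element count of distinct smaller values (rank = 1 + |{y in set(array) : y < x}|), with no sorting and no in-place mutation.
import Mathlib
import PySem

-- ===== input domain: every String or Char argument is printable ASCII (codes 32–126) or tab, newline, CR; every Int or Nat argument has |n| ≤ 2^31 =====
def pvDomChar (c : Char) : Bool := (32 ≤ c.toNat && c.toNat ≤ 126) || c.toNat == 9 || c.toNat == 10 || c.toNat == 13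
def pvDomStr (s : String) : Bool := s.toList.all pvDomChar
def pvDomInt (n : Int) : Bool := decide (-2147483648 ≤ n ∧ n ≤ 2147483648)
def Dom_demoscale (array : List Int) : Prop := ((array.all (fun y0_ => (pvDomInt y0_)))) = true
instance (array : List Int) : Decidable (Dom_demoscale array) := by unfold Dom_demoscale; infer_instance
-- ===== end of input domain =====

-- B drops A's sort + nested rank-lookup scan: it counts distinct smaller values per element directly (same cost, simpler).

-- ===== PORT A =====
def demoscale (array : List Int) : List Int :=
  -- newscore = [[0, x] for x in array]
  let newscore : List (Int × Int) := array.foldl (fun acc x => acc ++ [(0, x)]) []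
  -- array = list(set(array)); array.sort()   (sorted, so the set's hash order does not matter)
  let arr : List Int := PySem.List.sorted (PySem.Set.ofList array) (fun x => x) false
  -- for x in newscore: i = 0; for y in arr: if x[1]==y: x[0]=i+1; i+=1
  let newscore2 : List (Int × Int) := newscore.map (fun p =>
    ((arr.foldl (fun (st : Int × Int) y => (if p.2 = y then st.2 + 1 else st.1, st.2 + 1)) (p.1, 0)).1, p.2))
  -- for x in newscore: append(55 - x[0]*5 if ≥ 0 else 0)
  newscore2.foldl (fun acc p => acc ++ [if 55 - p.1 * 5 ≥ 0 then 55 - p.1 * 5 else 0]) []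

-- ===== PORT B =====
def demoscale_alt (array : List Int) : List Int :=
  let uniq : PySem.Set Int := PySem.Set.ofList array
  array.map (fun x => max 0 (50 - 5 * uniq.foldl (fun acc y => if y < x then acc + 1 else acc) (0 : Int)))

-- ===== PRECONDITION & SPEC =====
def Spec_demoscale (array : List Int) (out : List Int) : Prop := out = demoscale_alt array
instance (array : List Int) (out : List Int) : Decidable (Spec_demoscale array out) := by unfold Spec_demoscale; infer_instance

-- ===== CLAIM (what is proved, stated in full; the proofs are below) =====
def Claim_equal_demoscale : Prop := ∀ (array : List Int), Dom_demoscale array → Spec_demoscale array (demoscale array)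

-- ===== LEMMAS AND PROOFS =====

-- A's inner rank loop on a strictly increasing list: the rank written is 1 + (number of elements < v), when v occurs.
theorem pv_fold_rank (s : List Int) (hs : s.Pairwise (· < ·)) (v acc c : Int) :
    (s.foldl (fun (st : Int × Int) y => (if v = y then st.2 + 1 else st.1, st.2 + 1)) (acc, c)).1
      = if v ∈ s then c + (s.countP (fun y => decide (y < v)) : Int) + 1 else acc := by
  induction s generalizing acc c with
  | nil => simp
  | cons h t ih =>
    rcases List.pairwise_cons.mp hs with ⟨hh, ht⟩
    by_cases hv : v = h
    · subst hv
      have hnot : v ∉ t := fun hm => lt_irrefl v (hh v hm)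
      have hcnt : t.countP (fun y => decide (y < v)) = 0 := by
        rw [List.countP_eq_zero]
        intro y hy
        simp only [decide_eq_true_eq]
        exact not_lt.mpr (le_of_lt (hh y hy))
      simp [ih ht, hnot, hcnt]
    · by_cases hm : v ∈ t
      · have hlt : h < v := hh v hm
        simp [ih ht, hm, hv, hlt]
        ring
      · simp [ih ht, hm, hv]

theorem demoscale_spec_aux (array : List Int) : demoscale array = demoscale_alt array := by
  unfold demoscale demoscale_alt
  simp only [PySem.List.foldl_append_singleton_eq_map, List.nil_append, List.map_map]
  apply List.map_congr_left
  intro x hx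
  simp only [Function.comp]
  have hperm : (PySem.List.sorted (PySem.Set.ofList array) (fun x => x) false).Perm
      (PySem.Set.ofList array) := PySem.List.sorted_perm _ _ _
  have hmem : x ∈ PySem.List.sorted (PySem.Set.ofList array) (fun x => x) false := by
    rw [PySem.List.mem_sorted, PySem.Set.mem_ofList]; exact hx
  rw [pv_fold_rank _ (PySem.List.sorted_ofList_pairwise_lt array) x 0 0, if_pos hmem,
    hperm.countP_eq, PySem.List.foldl_ite_add_one]
  split_ifs with h <;> omega

-- ===== VERDICT (by name: the statement is the Claim_ definition above) =====
theorem demoscale_spec : Claim_equal_demoscale := by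
  intro array _
  exact demoscale_spec_aux array
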